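-- pv_equiv track=rewrite | github.com/makimedmat2/aoc | 2nd_dec/solution.py | recheck_order
-- ===== SOURCE A (Python) =====
-- def recheck_order(array:list, array_copy:list) -> bool:
--     pos_check = []
--     for a, c in zip(array, array_copy):
--         if a==c: pos_check.append(0)
--         else: pos_check.append(1)
--     occur = 0
--     for idx in range(len(pos_check)):
--         if idx+2 <= len(pos_check):
--             if pos_check[idx:idx+2] == [1, 1]: occur += 1
--     if occur == 1: return True
--     else: return False
-- ===== SOURCE B (Python) =====
-- def recheck_order(array: list, array_copy: list) -> bool:
--     # Sparse view: positions where the arrays disagree. An adjacent double-mismatch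
--     # is a consecutive pair of such positions; by the identity
--     #   adjacent pairs = (#mismatch positions) - (#maximal mismatch runs),
--     # it suffices to count mismatches and runs (a run boundary is a gap > 1).
--     diffs = [i for i, (a, c) in enumerate(zip(array, array_copy)) if a != c]
--     gaps = sum(1 for x, y in zip(diffs, diffs[1:]) if y - x > 1)
--     runs = gaps + (1 if diffs else 0)
--     return len(diffs) - runs == 1
-- ===== Notes on version B (the rewrite author's own statement) =====
-- stated objective: alternative
-- what changed: Instead of building a dense 0/1 mask and scanning every two-element slice for [1,1], B works on the sparse list of mismatch positions and uses the combinatorial identity adjacent-pairs = mismatches - maximal-runs (a run boundary is an index gap > 1), returning len(diffs) - runs == 1; no intermediate mask and no per-index slicing.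
import Mathlib
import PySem

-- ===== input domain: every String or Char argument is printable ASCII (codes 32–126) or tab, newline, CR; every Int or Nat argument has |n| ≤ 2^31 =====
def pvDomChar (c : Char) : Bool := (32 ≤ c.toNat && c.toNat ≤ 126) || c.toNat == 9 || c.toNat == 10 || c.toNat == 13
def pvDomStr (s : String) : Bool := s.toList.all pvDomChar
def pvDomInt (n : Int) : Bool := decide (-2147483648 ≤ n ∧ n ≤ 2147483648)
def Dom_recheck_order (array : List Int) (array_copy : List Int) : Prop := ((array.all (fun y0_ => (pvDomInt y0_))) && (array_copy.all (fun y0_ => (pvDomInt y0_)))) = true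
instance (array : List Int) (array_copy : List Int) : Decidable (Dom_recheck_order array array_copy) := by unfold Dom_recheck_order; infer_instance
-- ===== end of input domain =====

-- B replaces A's dense 0/1 mask + per-index slice scan by the sparse list of mismatch
-- positions and the identity adjacent-pairs = mismatches - maximal runs; objective: alternative.

-- ===== PORT A =====
-- one body of A's second loop: if idx+2 <= len(pos_check): if pos_check[idx:idx+2] == [1,1]: occur += 1
def recheck_order_astep (l : List Int) (occur : Int) (idx : Int) : Int :=
  if idx + 2 ≤ (l.length : Int) then
    (if PySem.List.slice l (some idx) (some (idx + 2)) = [(1 : Int), 1] then occur + 1 else occur)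
  else occur

def recheck_order (array : List Int) (array_copy : List Int) : Bool :=
  let pos_check := (array.zip array_copy).foldl
    (fun acc (p : Int × Int) => if p.1 = p.2 then acc ++ [(0 : Int)] else acc ++ [(1 : Int)]) []
  let occur := (PySem.List.pyRange 0 (pos_check.length : Int) 1).foldl (recheck_order_astep pos_check) 0
  if occur = 1 then true else false

-- ===== PORT B =====
-- gaps = sum(1 for x, y in zip(diffs, diffs[1:]) if y - x > 1); the sum of 1s is the filter's length
def recheck_order_gaps (ds : List Int) : Int :=
  (((ds.zip (ds.drop 1)).filter (fun xy => xy.2 - xy.1 > 1)).length : Int)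

def recheck_order_alt (array : List Int) (array_copy : List Int) : Bool :=
  let diffs := (PySem.List.enumerate (array.zip array_copy) 0).filterMap
    (fun ip => if ip.2.1 != ip.2.2 then some ip.1 else none)
  let runs := recheck_order_gaps diffs + (if diffs ≠ [] then 1 else 0)
  ((diffs.length : Int) - runs) == 1

-- ===== PRECONDITION & SPEC =====
def Spec_recheck_order (array : List Int) (array_copy : List Int) (out : Bool) : Prop := out = recheck_order_alt array array_copy
instance (array : List Int) (array_copy : List Int) (out : Bool) : Decidable (Spec_recheck_order array array_copy out) := by unfold Spec_recheck_order; infer_instance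

-- ===== CLAIM =====
def Claim_equal_recheck_order : Prop := ∀ (array : List Int) (array_copy : List Int), Dom_recheck_order array array_copy → Spec_recheck_order array array_copy (recheck_order array array_copy)

-- ===== LEMMAS AND PROOFS =====

-- number of adjacent (1,1) pairs in a 0/1 list
def pairCount : List Int → Int
  | x :: y :: t => (if x = 1 ∧ y = 1 then 1 else 0) + pairCount (y :: t)
  | _ => 0

-- the mismatch mask
def maskOf (zs : List (Int × Int)) : List Int :=
  zs.map (fun p => if p.1 = p.2 then (0 : Int) else 1)

-- sparse mismatch-position list starting at index j
def idxsOf (j : Int) : List (Int × Int) → List Int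
  | [] => []
  | p :: t => if p.1 = p.2 then idxsOf (j + 1) t else j :: idxsOf (j + 1) t

lemma mask_fold (zs : List (Int × Int)) (acc : List Int) :
    zs.foldl (fun acc (p : Int × Int) => if p.1 = p.2 then acc ++ [(0 : Int)] else acc ++ [(1 : Int)]) acc
      = acc ++ maskOf zs := by
  induction zs generalizing acc with
  | nil => simp [maskOf]
  | cons p t ih => by_cases h : p.1 = p.2 <;> simp [maskOf, h, ih, List.map]

lemma aloop (l : List Int) : ∀ (k j : Nat), j + k = l.length → ∀ acc : Int,
    (PySem.List.pyRange (j : Int) (l.length : Int) 1).foldl (recheck_order_astep l) acc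
      = acc + pairCount (l.drop j) := by
  intro k
  induction k with
  | zero =>
    intro j hj acc
    rw [PySem.List.pyRange_one_eq_nil (by omega)]
    have : l.drop j = [] := List.drop_eq_nil_of_le (by omega)
    simp [this, pairCount]
  | succ k ih =>
    intro j hj acc
    have hjlen : j < l.length := by omega
    rw [PySem.List.pyRange_one_cons (by exact_mod_cast hjlen)]
    have hcast : ((j : Int) + 1) = ((j + 1 : Nat) : Int) := by push_cast; ring
    rw [List.foldl_cons, hcast, ih (j + 1) (by omega)]
    have hdrop : l.drop j = l[j] :: l.drop (j + 1) := List.drop_eq_getElem_cons hjlen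
    have hslice : PySem.List.slice l (some (j : Int)) (some ((j : Int) + 2))
        = (l.drop j).take 2 := by
      have := PySem.List.slice_natCast_add l j 2
      simpa using this
    rcases h2 : l.drop (j + 1) with _ | ⟨y, t⟩
    · have hlen : j + 1 = l.length := by
        have := congrArg List.length h2; simp at this; omega
      have hcond : ¬ ((j : Int) + 2 ≤ (l.length : Int)) := by omega
      rw [recheck_order_astep, if_neg hcond]
      rw [hdrop, h2]
      simp [pairCount]
    · have hlen2 : j + 2 ≤ l.length := by
        have := congrArg List.length h2; simp at this; omega
      have hcond : ((j : Int) + 2 ≤ (l.length : Int)) := by omega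
      rw [recheck_order_astep, if_pos hcond, hslice, hdrop, h2]
      simp only [List.take_succ_cons, List.take_zero, pairCount]
      by_cases hx : l[j] = 1 ∧ y = 1
      · rw [if_pos (by simp [hx]), if_pos hx]; ring
      · rw [if_neg (by simp; intro h1 hy; exact hx ⟨h1, hy⟩), if_neg hx]; ring

lemma pairCount_cons (x : Int) (l : List Int) :
    pairCount (x :: l) = (if x = 1 ∧ l.head? = some 1 then 1 else 0) + pairCount l := by
  cases l with
  | nil => simp [pairCount]
  | cons y t => simp [pairCount]

lemma enum_filterMap (zs : List (Int × Int)) (j : Int) :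
    (PySem.List.enumerate zs j).filterMap
      (fun ip => if ip.2.1 != ip.2.2 then some ip.1 else none) = idxsOf j zs := by
  induction zs generalizing j with
  | nil => simp [PySem.List.enumerate_nil, idxsOf]
  | cons p t ih =>
    rw [PySem.List.enumerate_cons, List.filterMap_cons, ih]
    by_cases h : p.1 = p.2 <;> simp [idxsOf, h]

lemma idxsOf_ge (zs : List (Int × Int)) : ∀ (j : Int) (x : Int), x ∈ idxsOf j zs → j ≤ x := by
  induction zs with
  | nil => intro j x hx; simp [idxsOf] at hx
  | cons p t ih =>
    intro j x hx
    by_cases h : p.1 = p.2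
    · simp [idxsOf, h] at hx
      have := ih (j + 1) x hx; omega
    · simp [idxsOf, h] at hx
      rcases hx with hx | hx
      · omega
      · have := ih (j + 1) x hx; omega

lemma gaps_cons (x y : Int) (t : List Int) :
    recheck_order_gaps (x :: y :: t)
      = (if y - x > 1 then 1 else 0) + recheck_order_gaps (y :: t) := by
  unfold recheck_order_gaps
  simp only [List.drop_one, List.tail_cons, List.zip_cons_cons, List.filter_cons]
  by_cases h : y - x > 1 <;> simp [h] <;> ring

-- the identity: #mismatch positions - #gaps - (1 if any) = #adjacent double-mismatches
lemma key (zs : List (Int × Int)) : ∀ (j : Int),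
    ((idxsOf j zs).length : Int) - recheck_order_gaps (idxsOf j zs)
      - (if idxsOf j zs ≠ [] then 1 else 0) = pairCount (maskOf zs) := by
  induction zs with
  | nil => intro j; simp [idxsOf, maskOf, pairCount, recheck_order_gaps]
  | cons p t ih =>
    intro j
    by_cases h : p.1 = p.2
    · -- match: position j is skipped, mask gets a leading 0
      rw [show idxsOf j (p :: t) = idxsOf (j + 1) t from by simp [idxsOf, h],
          show maskOf (p :: t) = 0 :: maskOf t from by simp [maskOf, h],
          pairCount_cons]
      simp only [show ¬((0 : Int) = 1 ∧ (maskOf t).head? = some 1) from by simp, if_false, zero_add]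
      exact ih (j + 1)
    · -- mismatch: j is a mismatch position, mask gets a leading 1
      rw [show idxsOf j (p :: t) = j :: idxsOf (j + 1) t from by simp [idxsOf, h],
          show maskOf (p :: t) = 1 :: maskOf t from by simp [maskOf, h],
          pairCount_cons]
      have hIH := ih (j + 1)
      rcases t with _ | ⟨q, t'⟩
      · simp [idxsOf, maskOf, pairCount, recheck_order_gaps]
      · by_cases hq : q.1 = q.2
        · -- next pair matches: idxsOf (j+1) starts (if at all) at ≥ j+2: a gap, no [1,1] pair
          have hidx : idxsOf (j + 1) (q :: t') = idxsOf (j + 1 + 1) t' := by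
            simp [idxsOf, hq]
          have hmh : (maskOf (q :: t')).head? = some 0 := by simp [maskOf, hq]
          rw [hidx] at hIH ⊢
          rcases hr : idxsOf (j + 1 + 1) t' with _ | ⟨x, r⟩
          · rw [hr] at hIH
            have h0 : pairCount (maskOf (q :: t')) = 0 := by
              simpa [recheck_order_gaps] using hIH.symm
            simp [recheck_order_gaps, hmh, h0]
          · have hx : j + 1 + 1 ≤ x := idxsOf_ge t' (j + 1 + 1) x (by rw [hr]; simp)
            rw [hr] at hIH
            rw [gaps_cons, if_pos (by omega)]
            have hif : (if (1 : Int) = 1 ∧ (maskOf (q :: t')).head? = some 1 then (1 : Int) else 0) = 0 := by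
              simp [hmh]
            rw [hif]
            simp only [List.length_cons, ne_eq, List.cons_ne_nil, not_false_eq_true, if_true] at hIH ⊢
            push_cast at hIH ⊢
            omega
        · -- next pair mismatches: j+1 heads the index list: no gap, one [1,1] pair
          have hidx : idxsOf (j + 1) (q :: t') = (j + 1) :: idxsOf (j + 1 + 1) t' := by
            simp [idxsOf, hq]
          have hmh : (maskOf (q :: t')).head? = some 1 := by simp [maskOf, hq]
          rw [hidx] at hIH ⊢
          rw [gaps_cons, if_neg (by omega)]
          have hif : (if (1 : Int) = 1 ∧ (maskOf (q :: t')).head? = some 1 then (1 : Int) else 0) = 1 := by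
            simp [hmh]
          rw [hif]
          simp only [List.length_cons, ne_eq, List.cons_ne_nil, not_false_eq_true, if_true] at hIH ⊢
          push_cast at hIH ⊢
          omega

-- ===== VERDICT =====
theorem recheck_order_spec : Claim_equal_recheck_order := by
  intro array array_copy _
  unfold Spec_recheck_order recheck_order recheck_order_alt
  rw [mask_fold, enum_filterMap]
  simp only [List.nil_append]
  have ha := aloop (maskOf (array.zip array_copy)) (maskOf (array.zip array_copy)).length 0 (by simp) 0
  simp only [Nat.cast_zero, List.drop_zero, zero_add] at ha
  simp only [ha]
  have hk := key (array.zip array_copy) 0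
  rw [← hk]
  split_ifs with h <;> simp_all <;> omega
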